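-- pv_equiv track=rewrite | github.com/AdamLundb/AdventOfCode2024 | December5/utilsDay5.py | check_if_update_is_in_right_order
-- ===== SOURCE A (Python) =====
-- def check_if_update_is_in_right_order(ordering_rules, update):
--     update_order_indexes = []
--     for i in range(len(update)):
--         index_in_order_rules = ordering_rules.index(update[i])
--         update_order_indexes.append(index_in_order_rules)
--     if update_order_indexes == sorted(update_order_indexes):
--         return True
--     return False
-- ===== SOURCE B (Python) =====
-- def check_if_update_is_in_right_order(ordering_rules, update):
--     idxs = [ordering_rules.index(x) for x in update]
--     return all(idxs[i] <= idxs[i + 1] for i in range(len(idxs) - 1))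
-- ===== Notes on version B (the rewrite author's own statement) =====
-- stated objective: simpler
-- what changed: B decides orderedness with a single linear scan over consecutive index pairs instead of sorting the index list and comparing it to itself.
import Mathlib
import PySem

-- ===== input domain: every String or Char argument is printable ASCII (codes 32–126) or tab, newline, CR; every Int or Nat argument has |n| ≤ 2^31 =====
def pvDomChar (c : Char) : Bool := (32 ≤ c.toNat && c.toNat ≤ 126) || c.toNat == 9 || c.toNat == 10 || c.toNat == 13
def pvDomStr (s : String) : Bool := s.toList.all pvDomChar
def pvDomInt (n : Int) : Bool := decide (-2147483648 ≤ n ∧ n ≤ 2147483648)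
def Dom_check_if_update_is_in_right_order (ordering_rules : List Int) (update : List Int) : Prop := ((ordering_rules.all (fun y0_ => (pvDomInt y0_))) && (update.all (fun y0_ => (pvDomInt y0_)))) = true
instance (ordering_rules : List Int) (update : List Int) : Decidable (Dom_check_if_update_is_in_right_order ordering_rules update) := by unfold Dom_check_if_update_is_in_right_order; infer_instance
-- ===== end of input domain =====

-- B replaces A's sort-and-compare test with a single linear scan over consecutive pairs of the index list (simpler).

-- ===== PORT A =====
-- the loop building update_order_indexes; '.index' is total List.idxOf, exact under Pre_ (every element present)
def check_if_update_is_in_right_order (ordering_rules : List Int) (update : List Int) : Bool :=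
  let update_order_indexes : List Int :=
    update.foldl (fun acc x => acc ++ [((ordering_rules.idxOf x : Nat) : Int)]) []
  decide (update_order_indexes = PySem.List.sorted update_order_indexes (fun v => v) false)

-- ===== PORT B =====
-- all(idxs[i] <= idxs[i+1] for i in range(len(idxs)-1)) as a scan over consecutive pairs
def pvAllAdjacentLe : List Int → Bool
  | [] => true
  | [_] => true
  | a :: b :: t => decide (a ≤ b) && pvAllAdjacentLe (b :: t)

def check_if_update_is_in_right_order_alt (ordering_rules : List Int) (update : List Int) : Bool :=
  let idxs : List Int :=
    update.foldl (fun acc x => acc ++ [((ordering_rules.idxOf x : Nat) : Int)]) []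
  pvAllAdjacentLe idxs

-- ===== PRECONDITION & SPEC =====
-- Pre_ excludes exactly the inputs where some update element is absent from ordering_rules: there A raises ValueError (so does B).
def Pre_check_if_update_is_in_right_order (ordering_rules : List Int) (update : List Int) : Prop :=
  ∀ x ∈ update, x ∈ ordering_rules
instance (ordering_rules : List Int) (update : List Int) : Decidable (Pre_check_if_update_is_in_right_order ordering_rules update) := by unfold Pre_check_if_update_is_in_right_order; infer_instance

def pvWitness_check_if_update_is_in_right_order : List Int × List Int := ([3, 1, 2], [3, 2])

def Spec_check_if_update_is_in_right_order (ordering_rules : List Int) (update : List Int) (out : Bool) : Prop := out = check_if_update_is_in_right_order_alt ordering_rules update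
instance (ordering_rules : List Int) (update : List Int) (out : Bool) : Decidable (Spec_check_if_update_is_in_right_order ordering_rules update out) := by unfold Spec_check_if_update_is_in_right_order; infer_instance

-- ===== CLAIM (what is proved, stated in full; the proofs are below) =====
def Claim_equal_check_if_update_is_in_right_order : Prop := ∀ (ordering_rules : List Int) (update : List Int), Dom_check_if_update_is_in_right_order ordering_rules update → Pre_check_if_update_is_in_right_order ordering_rules update → Spec_check_if_update_is_in_right_order ordering_rules update (check_if_update_is_in_right_order ordering_rules update)

-- ===== LEMMAS AND PROOFS =====
lemma pvAllAdjacentLe_iff_pairwise : ∀ l : List Int, pvAllAdjacentLe l = true ↔ l.Pairwise (fun a b => a ≤ b)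
  | [] => by simp [pvAllAdjacentLe]
  | [a] => by simp [pvAllAdjacentLe]
  | a :: b :: t => by
    have ih := pvAllAdjacentLe_iff_pairwise (b :: t)
    simp only [pvAllAdjacentLe, Bool.and_eq_true, decide_eq_true_eq, ih, List.pairwise_cons,
      List.mem_cons] at *
    constructor
    · rintro ⟨hab, hb, hp⟩
      refine ⟨fun x hx => ?_, hb, hp⟩
      rcases hx with rfl | hx
      · exact hab
      · exact le_trans hab (hb x hx)
    · rintro ⟨ha, hb, hp⟩
      exact ⟨ha b (Or.inl rfl), hb, hp⟩

lemma pv_sorted_self_iff (l : List Int) :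
    (l = PySem.List.sorted l (fun v => v) false) ↔ l.Pairwise (fun a b => a ≤ b) := by
  constructor
  · intro h
    rw [h]
    exact PySem.List.sorted_pairwise l (fun v => v)
  · intro h
    exact (PySem.List.sorted_eq_self_of_pairwise l (fun v => v) h).symm

lemma pv_main (l : List Int) :
    decide (l = PySem.List.sorted l (fun v => v) false) = pvAllAdjacentLe l := by
  rw [Bool.eq_iff_iff, decide_eq_true_eq, pvAllAdjacentLe_iff_pairwise, pv_sorted_self_iff]

-- ===== VERDICT (by name: the statement is the Claim_ definition above) =====
theorem check_if_update_is_in_right_order_spec : Claim_equal_check_if_update_is_in_right_order := by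
  intro ordering_rules update _ _
  unfold Spec_check_if_update_is_in_right_order
  show check_if_update_is_in_right_order _ _ = _
  unfold check_if_update_is_in_right_order check_if_update_is_in_right_order_alt
  exact pv_main (update.foldl (fun acc x => acc ++ [((ordering_rules.idxOf x : Nat) : Int)]) [])
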